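-- pv_equiv track=rewrite | github.com/ReubenFrankel/hub-utils | hub_utils/meltano_util.py | _dedup_settings
-- ===== SOURCE A (Python) =====
-- def _dedup_settings(reformatted_settings):
--     reformatted_settings_2 = {}
--     for setting in reformatted_settings:
--         name = setting.get("name")
--         if name in reformatted_settings_2:
--             existing_setting = reformatted_settings_2.get(name)
--             existing_setting["description"] = ", ".join(
--                 [existing_setting["description"], setting.get("description")]
--             )
--         else:
--             reformatted_settings_2[name] = setting
--     return [value for key, value in reformatted_settings_2.items()]
-- ===== SOURCE B (Python) =====
-- def _dedup_settings(reformatted_settings):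
--     groups = {}
--     for setting in reformatted_settings:
--         groups.setdefault(setting.get("name"), []).append(setting)
--     result = []
--     for settings in groups.values():
--         first = settings[0]
--         for other in settings[1:]:
--             first["description"] = ", ".join(
--                 [first["description"], other.get("description")]
--             )
--         result.append(first)
--     return result
-- ===== Notes on version B (the rewrite author's own statement) =====
-- stated objective: alternative
-- what changed: A merges descriptions on the fly inside a single dict-building loop; B decomposes the task into two phases, first grouping the settings by name into lists (dict of groups) and then merging each group's descriptions in a separate pass.
import Mathlib
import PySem

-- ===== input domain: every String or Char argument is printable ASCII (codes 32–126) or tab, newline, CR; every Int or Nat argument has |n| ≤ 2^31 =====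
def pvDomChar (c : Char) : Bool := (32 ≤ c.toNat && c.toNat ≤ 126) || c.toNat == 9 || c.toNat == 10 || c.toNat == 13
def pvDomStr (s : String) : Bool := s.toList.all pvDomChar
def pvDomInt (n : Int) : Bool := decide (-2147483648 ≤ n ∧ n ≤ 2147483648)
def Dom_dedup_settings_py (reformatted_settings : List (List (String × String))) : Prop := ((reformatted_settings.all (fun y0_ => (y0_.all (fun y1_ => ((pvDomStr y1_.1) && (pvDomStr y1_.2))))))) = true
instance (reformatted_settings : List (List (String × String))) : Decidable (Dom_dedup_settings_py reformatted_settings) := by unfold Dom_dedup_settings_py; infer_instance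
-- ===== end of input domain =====

-- B replaces A's merge-as-you-go dict fold by a two-phase decomposition (group settings by name
-- first, then merge each group's descriptions); objective: alternative, same cost. Both A and B
-- mutate the first-seen setting dict in place in Python; the equivalence proved here is about the
-- return value (the mutations of A and B coincide on Pre_ as well, checked by test, not proved).


-- shared helpers: a setting is a Python dict[str, str] = association list (unique keys)
-- setting.get(k)  (None → none)
def pvGetKey (s : List (String × String)) (k : String) : Option String :=
  (s.find? (fun p => p.1 == k)).map (·.2)

-- setting["description"] = v  (in-place overwrite of an existing key; under Pre_ the key exists)
def pvSetDesc (s : List (String × String)) (v : String) : List (String × String) :=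
  s.map (fun p => if p.1 == "description" then ("description", v) else p)

-- first["description"] = ", ".join([first["description"], other.get("description")])
-- exact under Pre_ (both descriptions present; Python raises otherwise, excluded by Pre_)
def pvMergeStep (first other : List (String × String)) : List (String × String) :=
  pvSetDesc first (((pvGetKey first "description").getD "") ++ ", " ++ ((pvGetKey other "description").getD ""))

-- ===== PORT A =====
def dedup_settings_py (reformatted_settings : List (List (String × String))) : List (List (String × String)) :=
  (reformatted_settings.foldl
    (fun d setting =>
      let name := pvGetKey setting "name"
      match d.get? name with
      | some existing_setting => d.insert name (pvMergeStep existing_setting setting)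
      | none => d.insert name setting)
    PySem.Dict.empty).values

-- ===== PORT B =====
-- merge one group: first = settings[0]; for other in settings[1:]: merge descriptions
def pvMergeGroup (settings : List (List (String × String))) : List (String × String) :=
  match settings with
  | [] => []  -- unreachable: every group built below is nonempty
  | first :: rest => rest.foldl pvMergeStep first

def dedup_settings_py_alt (reformatted_settings : List (List (String × String))) : List (List (String × String)) :=
  let groups := reformatted_settings.foldl
    (fun g setting => g.modify (pvGetKey setting "name") [] (fun l => l ++ [setting]))
    PySem.Dict.empty
  groups.values.map pvMergeGroup

-- ===== PRECONDITION & SPEC =====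
-- Pre_ excludes exactly the inputs on which Python A raises (KeyError/TypeError): a setting whose
-- name occurs in at least two settings but which has no "description" key.
def Pre_dedup_settings_py (reformatted_settings : List (List (String × String))) : Prop :=
  ∀ s ∈ reformatted_settings,
    2 ≤ reformatted_settings.countP (fun t => pvGetKey t "name" == pvGetKey s "name") →
    (pvGetKey s "description").isSome = true
instance (reformatted_settings : List (List (String × String))) : Decidable (Pre_dedup_settings_py reformatted_settings) := by unfold Pre_dedup_settings_py; infer_instance

def pvWitness_dedup_settings_py : (List (List (String × String))) :=
  [[("name", "a"), ("description", "x")], [("name", "b")], [("name", "a"), ("description", "y")]]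

def Spec_dedup_settings_py (reformatted_settings : List (List (String × String))) (out : List (List (String × String))) : Prop := out = dedup_settings_py_alt reformatted_settings
instance (reformatted_settings : List (List (String × String))) (out : List (List (String × String))) : Decidable (Spec_dedup_settings_py reformatted_settings out) := by unfold Spec_dedup_settings_py; infer_instance

-- ===== CLAIM (what is proved, stated in full; the proofs are below) =====
def Claim_equal_dedup_settings_py : Prop := ∀ (reformatted_settings : List (List (String × String))), Dom_dedup_settings_py reformatted_settings → Pre_dedup_settings_py reformatted_settings → Spec_dedup_settings_py reformatted_settings (dedup_settings_py reformatted_settings)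

-- ===== LEMMAS AND PROOFS =====

-- abbreviations for the two loop bodies (definitionally the ports' folds)
def pvStepA (d : PySem.Dict (Option String) (List (String × String))) (setting : List (String × String)) : PySem.Dict (Option String) (List (String × String)) :=
  let name := pvGetKey setting "name"
  match d.get? name with
  | some existing_setting => d.insert name (pvMergeStep existing_setting setting)
  | none => d.insert name setting

def pvStepB (g : PySem.Dict (Option String) (List (List (String × String)))) (setting : List (String × String)) : PySem.Dict (Option String) (List (List (String × String))) :=
  g.modify (pvGetKey setting "name") [] (fun l => l ++ [setting])

lemma pvMergeGroup_append (g : List (List (String × String))) (x : List (String × String)) (hg : g ≠ []) :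
    pvMergeGroup (g ++ [x]) = pvMergeStep (pvMergeGroup g) x := by
  match g, hg with
  | f :: r, _ => simp [pvMergeGroup, List.foldl_append]

-- the invariant tying A's dict to B's grouping dict after any prefix
lemma pvInvariant (rs : List (List (String × String))) :
    (rs.foldl pvStepA PySem.Dict.empty).items
      = (rs.foldl pvStepB PySem.Dict.empty).items.map (fun p => (p.1, pvMergeGroup p.2))
    ∧ (rs.foldl pvStepB PySem.Dict.empty).keys.Nodup
    ∧ ∀ p ∈ (rs.foldl pvStepB PySem.Dict.empty).items, p.2 ≠ [] := by
  induction rs using List.reverseRecOn with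
  | nil => simp [PySem.Dict.empty]
  | append_singleton l x ih =>
    obtain ⟨hitems, hnd, hne⟩ := ih
    set dA := l.foldl pvStepA PySem.Dict.empty with hdA
    set dB := l.foldl pvStepB PySem.Dict.empty with hdB
    have hfA : (l ++ [x]).foldl pvStepA PySem.Dict.empty = pvStepA dA x := by
      rw [List.foldl_append]; rfl
    have hfB : (l ++ [x]).foldl pvStepB PySem.Dict.empty = pvStepB dB x := by
      rw [List.foldl_append]; rfl
    rw [hfA, hfB]
    have hndA : dA.keys.Nodup := by
      have : dA.keys = dB.keys := by
        simp [PySem.Dict.keys, hitems, List.map_map, Function.comp]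
      rw [this]; exact hnd
    set k := pvGetKey x "name" with hk
    have hmodB : pvStepB dB x = dB.insert k (dB.getD k [] ++ [x]) := rfl
    by_cases hc : dB.contains k = true
    · -- duplicate name: A merges, B appends to the group
      obtain ⟨g, hg⟩ : ∃ g, dB.get? k = some g := by
        have := PySem.Dict.contains_eq_isSome_get? (d := dB) (k := k)
        rw [hc] at this
        exact Option.isSome_iff_exists.mp this.symm
      have hgmem : (k, g) ∈ dB.items := PySem.Dict.mem_items_of_get?_eq_some _ hg
      have hgne : g ≠ [] := hne _ hgmem
      have hgetA : dA.get? k = some (pvMergeGroup g) := by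
        have hmem : (k, pvMergeGroup g) ∈ dA.items := by
          rw [hitems]; exact List.mem_map_of_mem hgmem
        exact PySem.Dict.get?_of_mem_items _ hmem hndA
      have hcA : dA.contains k = true := by
        rw [PySem.Dict.contains_eq_isSome_get?, hgetA]; rfl
      have hgetD : dB.getD k [] = g := PySem.Dict.getD_of_get?_eq_some _ _ hg
      refine ⟨?_, ?_, ?_⟩
      · show (pvStepA dA x).items = _
        simp only [pvStepA, ← hk, hgetA, hmodB, hgetD]
        rw [PySem.Dict.items_insert_of_contains _ _ hcA,
            PySem.Dict.items_insert_of_contains _ _ hc, hitems]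
        simp only [List.map_map, List.map_inj_left]
        intro p hp
        by_cases hpk : p.1 == k
        · simp [Function.comp, hpk, pvMergeGroup_append g x hgne]
        · simp [Function.comp, hpk]
      · rw [hmodB, PySem.Dict.keys_insert_of_contains _ _ hc]; exact hnd
      · rw [hmodB]
        intro p hp
        rcases (PySem.Dict.mem_items_insert _ _ _ _).mp hp with h | ⟨h, _⟩
        · rw [h]; simp
        · exact hne _ h
    · -- fresh name: both append a new entry
      have hcB : dB.contains k = false := by simpa using hc
      have hgetB : dB.get? k = none := by
        have := PySem.Dict.contains_eq_isSome_get? (d := dB) (k := k)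
        rw [hcB] at this
        simpa using (Option.isSome_eq_false_iff.mp this.symm)
      have hcA : dA.contains k = false := by
        have hkeys : dA.keys = dB.keys := by
          simp [PySem.Dict.keys, hitems, List.map_map, Function.comp]
        rw [PySem.Dict.contains_eq_decide_mem_keys, hkeys,
            ← PySem.Dict.contains_eq_decide_mem_keys]; exact hcB
      have hgetA : dA.get? k = none := by
        have := PySem.Dict.contains_eq_isSome_get? (d := dA) (k := k)
        rw [hcA] at this
        simpa using (Option.isSome_eq_false_iff.mp this.symm)
      have hgetD : dB.getD k [] = [] := PySem.Dict.getD_of_get?_eq_none _ _ hgetB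
      refine ⟨?_, ?_, ?_⟩
      · show (pvStepA dA x).items = _
        simp only [pvStepA, ← hk, hgetA, hmodB, hgetD]
        rw [PySem.Dict.items_insert_of_not_contains _ _ hcA,
            PySem.Dict.items_insert_of_not_contains _ _ hcB, hitems]
        simp [pvMergeGroup]
      · rw [hmodB, PySem.Dict.keys_insert_of_not_contains _ _ hcB]
        refine List.Nodup.append hnd (by simp) ?_
        intro a ha hb
        simp at hb
        subst hb
        exact absurd ((PySem.Dict.contains_iff_mem_keys _ _).mpr ha) hc
      · rw [hmodB]
        intro p hp
        rcases (PySem.Dict.mem_items_insert _ _ _ _).mp hp with h | ⟨h, _⟩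
        · rw [h]; simp
        · exact hne _ h

-- ===== VERDICT (by name: the statement is the Claim_ definition above) =====
theorem dedup_settings_py_spec : Claim_equal_dedup_settings_py := by
  intro rs _ _
  show dedup_settings_py rs = dedup_settings_py_alt rs
  obtain ⟨hitems, -, -⟩ := pvInvariant rs
  show (rs.foldl pvStepA PySem.Dict.empty).values = _
  simp only [dedup_settings_py_alt]
  show _ = (rs.foldl pvStepB PySem.Dict.empty).values.map pvMergeGroup
  simp [PySem.Dict.values, hitems, List.map_map, Function.comp]
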